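-- pv_equiv track=rewrite | github.com/vanes11/QuickFill | version1.py | ListOfCancatenateExpression
-- ===== SOURCE A (Python) =====
-- from collections.abc import Iterable
--
-- def flatten(items):
--     for x in items:
--         if isinstance(x, Iterable) and not isinstance(x, (str, bytes)):
--             for sub_x in flatten(x):
--                 yield sub_x
--         else:
--             yield x
--
-- def ListOfCancatenateExpression(dagExpression):
--
--     CanatenateString = ""
--     CanatenateString = "Concatenate( "
--     chainlist = []
--
--     for item in dagExpression:
--        chain = []
--        for elt in item:
--            if type(elt) == tuple:
--                chain.append(list(item[elt])[0])
--
--        chainlist.append(chain)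
--
--     chainlist  = list(flatten(chainlist))
--
--
--     if len(chainlist) > 1:
--       CanatenateString = CanatenateString + ",".join(chainlist) + " )"
--     else:
--       CanatenateString = ",".join(chainlist)
--
--     return CanatenateString
-- ===== SOURCE B (Python) =====
-- from collections.abc import Iterable
--
-- def ListOfCancatenateExpression(dagExpression):
--     # Same collection per dict (keeping the tuple-key filter), but flatten is
--     # an iterative explicit-stack loop instead of the recursive generator.
--     stack = [[list(item[elt])[0] for elt in item if type(elt) == tuple]
--              for item in dagExpression]
--     stack.reverse()
--     flat = []
--     while stack:
--         x = stack.pop()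
--         if isinstance(x, Iterable) and not isinstance(x, (str, bytes)):
--             stack.extend(reversed(x))
--         else:
--             flat.append(x)
--     if len(flat) > 1:
--         return "Concatenate( " + ",".join(flat) + " )"
--     return ",".join(flat)
-- ===== Notes on version B (the rewrite author's own statement) =====
-- stated objective: alternative
-- what changed: Keeps A's per-dict collection (including the tuple-key filter) but builds it as one comprehension and replaces the recursive flatten generator with an iterative explicit-stack loop that emits the same DFS order.
import Mathlib
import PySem

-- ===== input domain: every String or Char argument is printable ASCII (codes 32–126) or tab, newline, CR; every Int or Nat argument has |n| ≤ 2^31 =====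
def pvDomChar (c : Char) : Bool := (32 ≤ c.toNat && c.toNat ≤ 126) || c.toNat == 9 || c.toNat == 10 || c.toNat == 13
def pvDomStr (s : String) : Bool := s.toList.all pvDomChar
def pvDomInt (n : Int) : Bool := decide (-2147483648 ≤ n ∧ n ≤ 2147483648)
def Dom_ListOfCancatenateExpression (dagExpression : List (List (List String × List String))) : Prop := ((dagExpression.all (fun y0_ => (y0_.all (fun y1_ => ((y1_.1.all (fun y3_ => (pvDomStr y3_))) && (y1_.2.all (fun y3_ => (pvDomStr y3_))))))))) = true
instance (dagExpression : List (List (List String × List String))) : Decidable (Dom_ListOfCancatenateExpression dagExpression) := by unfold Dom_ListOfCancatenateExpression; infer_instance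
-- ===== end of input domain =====

-- B keeps A's per-dict collection (incl. the tuple-key filter, vacuous at this type) but replaces the
-- recursive flatten generator with an iterative explicit-stack loop emitting the same DFS order (alternative).


-- ===== PORT A =====
-- flatten, instantiated at the two element types that occur here: a chain's
-- elements are str (yielded as-is), chainlist's elements are non-str iterables
-- (recursed into, one level).
def pvFlattenChain (items : List String) : List String :=
  items.foldl (fun acc x => acc ++ [x]) []

def pvFlatten (items : List (List String)) : List String :=
  items.foldl (fun acc x => acc ++ pvFlattenChain x) []

-- each Python item is a dict with tuple keys, modelled by PySem.Dict.ofList;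
-- at this signature every key is a tuple, so `type(elt) == tuple` is always
-- true; `list(item[elt])[0]` is pyGet? … 0, exact under Pre_ (Python raises
-- IndexError on an empty value).
def ListOfCancatenateExpression (dagExpression : List (List (List String × List String))) : String :=
  let chainlist : List (List String) :=
    dagExpression.foldl (fun cl item =>
      let d := PySem.Dict.ofList item
      let chain := d.keys.foldl (fun ch elt =>
        ch ++ [(PySem.List.pyGet? (d.getD elt []) 0).getD ""]) []
      cl ++ [chain]) []
  let flat := pvFlatten chainlist
  if flat.length > 1 then
    "Concatenate( " ++ PySem.Str.join "," flat ++ " )"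
  else
    PySem.Str.join "," flat

-- ===== PORT B =====
-- the Python stack holds lists (initially) and strings (after extend); modelled
-- as Sum.  The Lean list's HEAD is Python's stack TOP (so Python's
-- build-then-reverse is the map itself, and extend(reversed(x)) is prepending x).
def pvStackFlatten (stack : List (List String ⊕ String)) (flat : List String) : List String :=
  match stack with
  | [] => flat
  | Sum.inr s :: rest => pvStackFlatten rest (flat ++ [s])
  | Sum.inl xs :: rest => pvStackFlatten (xs.map Sum.inr ++ rest) flat
termination_by (stack.map (fun e => match e with | Sum.inl xs => xs.length + 2 | Sum.inr _ => 1)).sum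
decreasing_by all_goals (simp [Function.comp_def, List.map_const', List.sum_replicate]; try omega)

def ListOfCancatenateExpression_alt (dagExpression : List (List (List String × List String))) : String :=
  let stack : List (List String ⊕ String) :=
    dagExpression.map (fun item =>
      let d := PySem.Dict.ofList item
      -- tuple-key filter is vacuously true at this signature
      Sum.inl (d.keys.map (fun elt => (PySem.List.pyGet? (d.getD elt []) 0).getD "")))
  let flat := pvStackFlatten stack []
  if flat.length > 1 then
    "Concatenate( " ++ PySem.Str.join "," flat ++ " )"
  else
    PySem.Str.join "," flat

-- ===== PRECONDITION & SPEC =====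
-- Pre_ excludes exactly the inputs on which Python A raises IndexError: some dict value is the
-- empty list, so list(item[elt])[0] fails (B's list(item[elt])[0] raises there too).
def Pre_ListOfCancatenateExpression (dagExpression : List (List (List String × List String))) : Prop :=
  ∀ item ∈ dagExpression, ∀ v ∈ (PySem.Dict.ofList item).values, v ≠ []
instance (dagExpression : List (List (List String × List String))) : Decidable (Pre_ListOfCancatenateExpression dagExpression) := by unfold Pre_ListOfCancatenateExpression; infer_instance

def pvWitness_ListOfCancatenateExpression : (List (List (List String × List String))) :=
  [[(["a"], ["x"]), (["b"], ["y"])]]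

def Spec_ListOfCancatenateExpression (dagExpression : List (List (List String × List String))) (out : String) : Prop := out = ListOfCancatenateExpression_alt dagExpression
instance (dagExpression : List (List (List String × List String))) (out : String) : Decidable (Spec_ListOfCancatenateExpression dagExpression out) := by unfold Spec_ListOfCancatenateExpression; infer_instance

-- ===== CLAIM (what is proved, stated in full; the proofs are below) =====
def Claim_equal_ListOfCancatenateExpression : Prop := ∀ (dagExpression : List (List (List String × List String))), Dom_ListOfCancatenateExpression dagExpression → Pre_ListOfCancatenateExpression dagExpression → Spec_ListOfCancatenateExpression dagExpression (ListOfCancatenateExpression dagExpression)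

-- ===== LEMMAS AND PROOFS =====
theorem pvFlattenChain_eq (items : List String) : pvFlattenChain items = items := by
  simpa [pvFlattenChain] using PySem.List.foldl_append_singleton items

theorem pvFlatten_eq (items : List (List String)) : pvFlatten items = items.flatten := by
  unfold pvFlatten
  rw [PySem.List.foldl_append_eq_flatMap,
    show pvFlattenChain = id from funext pvFlattenChain_eq, List.flatMap_id, List.nil_append]

-- semantics of the explicit-stack loop: it emits the stack's DFS order after the accumulator
theorem pvStackFlatten_eq (stack : List (List String ⊕ String)) (flat : List String) :
    pvStackFlatten stack flat
      = flat ++ stack.flatMap (fun e => match e with | Sum.inl xs => xs | Sum.inr s => [s]) := by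
  induction stack, flat using pvStackFlatten.induct with
  | case1 flat => simp [pvStackFlatten]
  | case2 flat s rest ih => simp [pvStackFlatten, ih]
  | case3 flat xs rest ih =>
    simp only [List.map_subtype, List.unattach_attach] at ih
    rw [pvStackFlatten, ih]
    simp [List.flatMap_append, List.flatMap_map]

-- ===== VERDICT (by name: the statement is the Claim_ definition above) =====
theorem ListOfCancatenateExpression_spec : Claim_equal_ListOfCancatenateExpression := by
  intro dag _ _
  unfold Spec_ListOfCancatenateExpression ListOfCancatenateExpression ListOfCancatenateExpression_alt
  simp only [PySem.List.foldl_append_singleton_eq_map, List.nil_append, pvFlatten_eq,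
    pvStackFlatten_eq, List.flatMap_map, List.flatten_eq_flatMap, id_eq]
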